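-- pv_equiv track=rewrite | github.com/lmcai/Orobanchaceae_O2K | 4_Molecular_evolution/n-terminal_pp_removal.py | find_nth_non_gap_index
-- ===== SOURCE A (Python) =====
-- def find_nth_non_gap_index(sequence, n):
--     count = 0
--     for i, char in enumerate(sequence):
--         if char != '-':
--             count += 1
--             if count == n:
--                 return i
--     return len(sequence)  # If fewer than n non-gap characters
-- ===== SOURCE B (Python) =====
-- def find_nth_non_gap_index(sequence, n):
--     positions = [i for i, c in enumerate(sequence) if c != '-']
--     if 1 <= n <= len(positions):
--         return positions[n - 1]
--     return len(sequence)
-- ===== Notes on version B (the rewrite author's own statement) =====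
-- stated objective: simpler
-- what changed: Replaces the counting early-exit scan with a single pass that collects all non-gap positions into a table followed by one direct index lookup.
import Mathlib
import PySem

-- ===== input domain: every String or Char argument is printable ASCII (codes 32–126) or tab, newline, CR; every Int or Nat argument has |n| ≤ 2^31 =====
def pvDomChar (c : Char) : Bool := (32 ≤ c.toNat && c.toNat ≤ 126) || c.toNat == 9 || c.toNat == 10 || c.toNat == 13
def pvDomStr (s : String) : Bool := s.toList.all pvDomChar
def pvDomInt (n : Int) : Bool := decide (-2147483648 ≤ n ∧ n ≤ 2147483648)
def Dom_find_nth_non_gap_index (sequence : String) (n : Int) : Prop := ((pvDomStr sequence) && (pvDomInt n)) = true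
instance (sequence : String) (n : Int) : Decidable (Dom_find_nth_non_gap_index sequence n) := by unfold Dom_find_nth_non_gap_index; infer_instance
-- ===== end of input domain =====

-- B replaces A's counting early-exit scan by a table of all non-gap positions plus one direct lookup (objective: simpler).

-- ===== PORT A =====
-- the for-loop of A: early-exit scan over enumerate(sequence) carrying the count
def pvLoopA : List (Int × Char) → Int → Int → Option Int
  | [], _, _ => none
  | (i, c) :: rest, count, n =>
      if c ≠ '-' then
        (if count + 1 = n then some i else pvLoopA rest (count + 1) n)
      else pvLoopA rest count n

def find_nth_non_gap_index (sequence : String) (n : Int) : Int :=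
  match pvLoopA (PySem.List.enumerate sequence.toList) 0 n with
  | some i => i
  | none => (sequence.toList.length : Int)

-- ===== PORT B =====
def find_nth_non_gap_index_alt (sequence : String) (n : Int) : Int :=
  let positions : List Int :=
    ((PySem.List.enumerate sequence.toList).filter (fun p => p.2 ≠ '-')).map Prod.fst
  if 1 ≤ n ∧ n ≤ (positions.length : Int) then
    (PySem.List.pyGet? positions (n - 1)).getD 0   -- the guard makes the index in range
  else (sequence.toList.length : Int)

-- ===== PRECONDITION & SPEC =====
def Spec_find_nth_non_gap_index (sequence : String) (n : Int) (out : Int) : Prop := out = find_nth_non_gap_index_alt sequence n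
instance (sequence : String) (n : Int) (out : Int) : Decidable (Spec_find_nth_non_gap_index sequence n out) := by unfold Spec_find_nth_non_gap_index; infer_instance

-- ===== CLAIM (what is proved, stated in full; the proofs are below) =====
def Claim_equal_find_nth_non_gap_index : Prop := ∀ (sequence : String) (n : Int), Dom_find_nth_non_gap_index sequence n → Spec_find_nth_non_gap_index sequence n (find_nth_non_gap_index sequence n)

-- ===== LEMMAS AND PROOFS =====

-- A's loop returns exactly the (n-count)-th entry of the non-gap position table, when it exists.
theorem pvLoopA_eq (n : Int) : ∀ (l : List (Int × Char)) (count : Int),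
    pvLoopA l count n =
      if count < n then
        ((l.filter (fun p => p.2 ≠ '-')).map Prod.fst)[(n - count - 1).toNat]?
      else none := by
  intro l
  induction l with
  | nil => intro count; simp [pvLoopA]
  | cons hd rest ih =>
    intro count
    obtain ⟨i, c⟩ := hd
    by_cases hc : c = '-'
    · simp [pvLoopA, hc, ih]
    · by_cases hn : count + 1 = n
      · have h1 : count < n := by omega
        have h2 : (n - count - 1).toNat = 0 := by omega
        simp [pvLoopA, hc, hn, h1, h2]
      · simp only [pvLoopA, hc, hn, if_false, ite_true, ne_eq, not_false_eq_true,
          List.filter_cons_of_pos, decide_eq_true_eq, List.map_cons, if_neg]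
        rw [ih (count + 1)]
        by_cases h1 : count < n
        · have h2 : count + 1 < n := by omega
          have h3 : (n - count - 1).toNat = (n - (count + 1) - 1).toNat + 1 := by omega
          simp [h1, h2, h3]
        · have h2 : ¬ count + 1 < n := by omega
          simp [h1, h2]

-- ===== VERDICT (by name: the statement is the Claim_ definition above) =====

theorem find_nth_non_gap_index_spec : Claim_equal_find_nth_non_gap_index := by
  intro sequence n _
  unfold Spec_find_nth_non_gap_index find_nth_non_gap_index find_nth_non_gap_index_alt
  set ps : List Int :=
    ((PySem.List.enumerate sequence.toList).filter (fun p => p.2 ≠ '-')).map Prod.fst with hps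
  rw [pvLoopA_eq]
  by_cases h0 : 0 < n
  · rw [if_pos h0]
    simp only [show n - 0 - 1 = n - 1 from by ring]
    have hget : PySem.List.pyGet? ps (n - 1) = ps[(n - 1).toNat]? :=
      PySem.List.pyGet?_of_nonneg ps (show (0 : Int) ≤ n - 1 from by omega)
    by_cases hlen : n ≤ (ps.length : Int)
    · have hlt : (n - 1).toNat < ps.length := by omega
      rw [if_pos ⟨by omega, hlen⟩, hget, List.getElem?_eq_getElem hlt]; rfl
    · have hge : ps.length ≤ (n - 1).toNat := by omega
      rw [List.getElem?_eq_none hge, if_neg (by omega : ¬(1 ≤ n ∧ n ≤ (ps.length : Int)))]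
  · rw [if_neg h0, if_neg (by omega : ¬(1 ≤ n ∧ n ≤ (ps.length : Int)))]
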